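-- pv_equiv track=rewrite | github.com/VincentSidot/projet_euler | projet_euler.py | reduce_path
-- ===== SOURCE A (Python) =====
-- def triangular(n):
--     return (n*(n+1))//2
--
-- def trouver_hauteur(x):
--     i = 0
--     while x>triangular(i):
--         i+=1
--     return i
--
-- def reduce_path(L):
--     h = trouver_hauteur(len(L))
--     newL = L[:len(L)-h]
--     a = triangular(h-2)
--     b = triangular(h-1)
--     for i in range(h-1):
--         newL[a+i] += max(L[b+i],L[b+i+1])
--     return newL
-- ===== SOURCE B (Python) =====
-- def reduce_path(L):
--     # Chop L into rows of widths 1,2,3,... ; fold max of the last row into the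
--     # second-to-last row; return the concatenation of all rows but the last.
--     rows = []
--     i, w = 0, 1
--     while i < len(L):
--         rows.append(L[i:i + w])
--         i += w
--         w += 1
--     if not rows:
--         return []
--     last = rows[-1]
--     body = rows[:-1]
--     if body:
--         penult = body[-1]
--         for j in range(len(penult)):
--             penult[j] += max(last[j], last[j + 1])
--     return [x for row in body for x in row]
-- ===== Notes on version B (the rewrite author's own statement) =====
-- stated objective: alternative
-- what changed: B never computes triangular numbers or index offsets: it chops L into rows of widths 1,2,3,..., folds the max of the last row into the second-to-last row element-wise, and concatenates all rows but the last, instead of A's height search plus flat-index arithmetic into a slice.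
import Mathlib
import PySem

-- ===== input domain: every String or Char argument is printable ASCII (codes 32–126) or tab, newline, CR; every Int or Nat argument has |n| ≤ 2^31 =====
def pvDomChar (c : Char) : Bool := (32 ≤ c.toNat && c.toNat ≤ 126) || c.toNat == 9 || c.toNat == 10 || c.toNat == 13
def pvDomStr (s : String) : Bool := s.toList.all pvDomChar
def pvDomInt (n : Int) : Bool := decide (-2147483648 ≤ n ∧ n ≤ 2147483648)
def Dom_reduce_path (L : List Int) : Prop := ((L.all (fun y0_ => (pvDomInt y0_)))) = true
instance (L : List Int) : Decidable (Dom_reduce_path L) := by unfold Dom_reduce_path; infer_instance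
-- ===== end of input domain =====

-- B chops L into rows of widths 1,2,3,… and folds the last row into the second-to-last,
-- instead of A's triangular-number height search plus flat-index arithmetic (objective: alternative).
-- Neither program mutates its argument (A copies via a slice, B copies via row slices).

-- ===== PORT A =====
def triangular (n : Int) : Int := PySem.Int.floordiv (n * (n + 1)) 2

-- termination fact for A's `while x > triangular(i): i += 1` loop (cited by `decreasing_by`)
theorem pvThLoop_lt {x i : Int} (h : x > triangular i) : (x - (i + 1)).toNat < (x - i).toNat := by
  have h2 : i ≤ triangular i := by
    unfold triangular
    rw [PySem.Int.le_floordiv_iff_mul_le (by omega)]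
    have hnn : 0 ≤ i * (i - 1) := by
      rcases (by omega : i ≤ 0 ∨ 1 ≤ i) with hi | hi
      · have hpos := mul_nonneg (show (0 : Int) ≤ -i by omega) (show (0 : Int) ≤ -(i - 1) by omega)
        have hre : -i * -(i - 1) = i * (i - 1) := by ring
        omega
      · exact mul_nonneg (by omega) (by omega)
    have hexp : i * (i + 1) = i * (i - 1) + 2 * i := by ring
    omega
  omega

def trouver_hauteur_loop (x i : Int) : Int :=
  if hgt : x > triangular i then trouver_hauteur_loop x (i + 1) else i
termination_by (x - i).toNat
decreasing_by exact pvThLoop_lt hgt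

def trouver_hauteur (x : Int) : Int := trouver_hauteur_loop x 0

def reduce_path (L : List Int) : List Int :=
  let h := trouver_hauteur (L.length : Int)
  let newL := PySem.List.slice L none (some ((L.length : Int) - h))
  let a := triangular (h - 2)
  let b := triangular (h - 1)
  (PySem.List.pyRange 0 (h - 1) 1).foldl (fun acc i =>
    PySem.List.pySetD acc (a + i)
      (PySem.List.pyGetD acc (a + i) 0 +
        max (PySem.List.pyGetD L (b + i) 0) (PySem.List.pyGetD L (b + i + 1) 0))) newL

-- ===== PORT B =====
-- rows of widths 1,2,3,…: `splitRows L k` takes rows of widths k+1, k+2, …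
-- (the Python's `w` is carried as `k` with w = k+1, so the recursion visibly decreases)
def splitRows (L : List Int) (k : Nat) : List (List Int) :=
  if hne : L = [] then [] else L.take (k + 1) :: splitRows (L.drop (k + 1)) (k + 1)
termination_by L.length
decreasing_by
  rw [List.length_drop]
  have : L.length ≠ 0 := fun e => hne (List.length_eq_zero_iff.mp e)
  omega

def reduce_path_alt (L : List Int) : List Int :=
  let rows := splitRows L 0
  match rows.getLast? with
  | none => []
  | some last =>
    let body := rows.dropLast
    let body2 :=
      match body.getLast? with
      | none => body
      | some penult =>
        let penult2 := (List.range penult.length).foldl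
          (fun (p : List Int) (j : Nat) =>
            p.set j (p.getD j 0 + max (last.getD j 0) (last.getD (j + 1) 0))) penult
        body.dropLast ++ [penult2]
    body2.flatten

-- ===== PRECONDITION & SPEC =====
-- Pre_: len(L) is a triangular number — on any other length A raises IndexError.
def Pre_reduce_path (L : List Int) : Prop := ∃ h ∈ List.range (L.length + 1), 2 * L.length = h * (h + 1)
instance (L : List Int) : Decidable (Pre_reduce_path L) := by unfold Pre_reduce_path; infer_instance
def pvWitness_reduce_path : List Int := [1, 2, 3]
def Spec_reduce_path (L : List Int) (out : List Int) : Prop := out = reduce_path_alt L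
instance (L : List Int) (out : List Int) : Decidable (Spec_reduce_path L out) := by unfold Spec_reduce_path; infer_instance

-- ===== CLAIM (what is proved, stated in full; the proofs are below) =====
def Claim_equal_reduce_path : Prop := ∀ (L : List Int), Dom_reduce_path L → Pre_reduce_path L → Spec_reduce_path L (reduce_path L)

-- ===== LEMMAS AND PROOFS =====

def triN (h : Nat) : Nat := h * (h + 1) / 2

theorem two_triN (h : Nat) : 2 * triN h = h * (h + 1) := by
  obtain ⟨c, hc⟩ := Nat.even_mul_succ_self h
  unfold triN
  omega

theorem triN_succ (h : Nat) : triN (h + 1) = triN h + (h + 1) := by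
  have h1 := two_triN h
  have h2 := two_triN (h + 1)
  have key : (h + 1) * (h + 1 + 1) = h * (h + 1) + 2 * (h + 1) := by ring
  omega

theorem triN_mono {i h : Nat} (hih : i < h) : triN i < triN h := by
  have h1 := two_triN i
  have h2 := two_triN h
  have : i * (i + 1) < h * (h + 1) :=
    Nat.mul_lt_mul_of_lt_of_le hih (by omega) (by omega)
  omega

theorem triN_le {i h : Nat} (hih : i ≤ h) : triN i ≤ triN h := by
  rcases Nat.lt_or_ge i h with hl | hg
  · exact Nat.le_of_lt (triN_mono hl)
  · have : i = h := by omega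
    simp [this]

theorem triN_ge (h : Nat) : h ≤ triN h := by
  have h1 := two_triN h
  nlinarith

theorem triangular_natCast (i : Nat) : triangular (i : Int) = (triN i : Int) := by
  unfold triangular triN
  have : ((i : Int) * ((i : Int) + 1)) = ((i * (i + 1) : Nat) : Int) := by push_cast; ring
  rw [this]
  exact_mod_cast PySem.Int.floordiv_natCast (i * (i + 1)) 2

theorem th_loop_eq (h : Nat) : ∀ i : Nat, i ≤ h → trouver_hauteur_loop (triN h : Int) (i : Int) = (h : Int) := by
  intro i hi
  induction hd : h - i generalizing i with
  | zero =>
    have hih : i = h := by omega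
    subst hih
    rw [trouver_hauteur_loop, triangular_natCast, dif_neg (by omega)]
  | succ d ih =>
    rw [trouver_hauteur_loop, triangular_natCast]
    have hlt : (triN i : Int) < triN h := by exact_mod_cast triN_mono (by omega : i < h)
    rw [dif_pos (by omega)]
    rw [show ((i : Int) + 1) = ((i + 1 : Nat) : Int) by push_cast; ring]
    exact ih (i + 1) (by omega) (by omega)

theorem trouver_hauteur_triN (h : Nat) : trouver_hauteur ((triN h : Nat) : Int) = (h : Int) := by
  have := th_loop_eq h 0 (by omega)
  simpa [trouver_hauteur] using this

-- folding `set (a+j) (getD (a+j) + g j)` over j = 0..m-1 rewrites a middle segment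
theorem foldl_set_consec (g : Nat → Int) (a : Nat) :
    ∀ (m : Nat) (base : List Int), a + m ≤ base.length →
    (List.range m).foldl (fun acc j => acc.set (a + j) (acc.getD (a + j) 0 + g j)) base
      = base.take a ++ (List.range m).map (fun j => base.getD (a + j) 0 + g j) ++ base.drop (a + m) := by
  intro m
  induction m with
  | zero => intro base hlen; simp
  | succ m ih =>
    intro base hlen
    have hb : a + m < base.length := by omega
    rw [List.range_succ, List.foldl_append, ih base (by omega)]
    simp only [List.foldl_cons, List.foldl_nil]
    have hTake : (base.take a).length = a := by rw [List.length_take]; omega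
    have hMap : ((List.range m).map (fun j => base.getD (a + j) 0 + g j)).length = m := by simp
    have hlen2 : (base.take a ++ (List.range m).map (fun j => base.getD (a + j) 0 + g j)).length = a + m := by
      simp [hTake]
    have hread : (base.take a ++ (List.range m).map (fun j => base.getD (a + j) 0 + g j)
        ++ base.drop (a + m)).getD (a + m) 0 = base.getD (a + m) 0 := by
      rw [List.getD_eq_getElem?_getD, List.getElem?_append_right (by omega), hlen2,
        Nat.sub_self, List.getElem?_drop, Nat.add_zero, List.getD_eq_getElem?_getD]
    rw [hread, List.set_append_right _ _ (by omega), hlen2, Nat.sub_self,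
      List.drop_eq_getElem_cons hb, List.set_cons_zero]
    simp [List.map_append, List.append_assoc, Nat.add_assoc]
-- splitRows sends `prefix ++ last-row` to rows-of-prefix ++ [last-row]
theorem splitRows_concat : ∀ (d k : Nat) (M R : List Int),
    M.length + triN k = triN (k + d) → R.length = k + 1 + d →
    splitRows (M ++ R) k = splitRows M k ++ [R] := by
  intro d
  induction d with
  | zero =>
    intro k M R hM hR
    rw [Nat.add_zero] at hM
    have hM0 : M = [] := by
      have : M.length = 0 := by omega
      exact List.length_eq_zero_iff.mp this
    subst hM0
    have hRne : R ≠ [] := by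
      intro e; rw [e] at hR; simp at hR
    rw [List.nil_append, splitRows, dif_neg hRne,
      splitRows, dif_pos (List.drop_eq_nil_of_le (show R.length ≤ k + 1 by omega)),
      splitRows, dif_pos rfl, List.take_of_length_le (by omega)]
    simp
  | succ d ih =>
    intro k M R hM hR
    have ts : triN (k + 1) = triN k + (k + 1) := triN_succ k
    have hM' : M.length + triN k = triN ((k + 1) + d) := by
      rwa [show k + (d + 1) = (k + 1) + d by omega] at hM
    have hmono : triN (k + 1) ≤ triN ((k + 1) + d) := triN_le (by omega)
    have hMlen : k + 1 ≤ M.length := by omega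
    have hMne : M ≠ [] := by
      intro e; rw [e] at hMlen; simp at hMlen
    have hMRne : M ++ R ≠ [] := by
      intro e
      have h0 : (M ++ R).length = 0 := by rw [e]; rfl
      rw [List.length_append] at h0
      omega
    rw [splitRows, dif_neg hMRne, List.take_append_of_le_length hMlen,
      List.drop_append_of_le_length hMlen,
      ih (k + 1) (M.drop (k + 1)) R (by rw [List.length_drop]; omega) (by omega)]
    conv_rhs => rw [splitRows]
    rw [dif_neg hMne, List.cons_append]

theorem flatten_splitRows (L : List Int) (k : Nat) : (splitRows L k).flatten = L := by
  induction L, k using splitRows.induct with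
  | case1 k => rw [splitRows, dif_pos rfl]; rfl
  | case2 L k hL ih => rw [splitRows, dif_neg hL]; simp [ih, List.take_append_drop]

theorem splitRows_nil (k : Nat) : splitRows [] k = [] := by
  rw [splitRows]; simp

theorem reduce_path_eq (L : List Int) (h : Nat) (hlen : L.length = triN h) :
    reduce_path L = reduce_path_alt L := by
  have hth : trouver_hauteur ((L.length : Int)) = (h : Int) := by
    rw [hlen]; exact trouver_hauteur_triN h
  have hge := triN_ge h
  rcases Nat.lt_or_ge h 2 with hsmall | hbig
  · -- h = 0 or h = 1: both sides are []
    have htr : triN h = h := by interval_cases h <;> rfl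
    have hA : reduce_path L = [] := by
      simp only [reduce_path]
      rw [hth, PySem.List.pyRange_one,
        show (((h : Int) - 1) - 0).toNat = 0 by omega]
      simp only [List.range_zero, List.map_nil, List.foldl_nil]
      rw [show ((L.length : Int) - (h : Int)) = ((0 : Nat) : Int) by omega,
        PySem.List.slice_to_natCast, List.take_zero]
    have hB : reduce_path_alt L = [] := by
      interval_cases h
      · -- L = []
        have hL : L = [] := List.length_eq_zero_iff.mp (by simpa [triN] using hlen)
        subst hL
        simp [reduce_path_alt, splitRows_nil]
      · -- L has length 1
        have hL1 : L.length = 1 := by simpa [triN] using hlen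
        have hLne : L ≠ [] := by intro e; rw [e] at hL1; simp at hL1
        have hrows : splitRows L 0 = [L] := by
          rw [splitRows, dif_neg hLne, List.take_of_length_le (by omega),
            List.drop_eq_nil_of_le (by omega), splitRows_nil]
        simp [reduce_path_alt, hrows]
    rw [hA, hB]
  · -- main case: h ≥ 2
    set t2 := triN (h - 2) with ht2
    set t1 := triN (h - 1) with ht1
    have e1 : t1 = t2 + (h - 1) := by
      have := triN_succ (h - 2)
      rwa [show h - 2 + 1 = h - 1 by omega] at this
    have e2 : triN h = t1 + h := by
      have := triN_succ (h - 1)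
      rwa [show h - 1 + 1 = h by omega] at this
    have ht2le : t2 ≤ t1 := by omega
    have ht1le : t1 ≤ L.length := by omega
    set M := L.take t1 with hM
    set R := L.drop t1 with hR
    set P := M.drop t2 with hP
    set M2 := M.take t2 with hM2
    have hlenM : M.length = t1 := by rw [hM, List.length_take]; omega
    have hlenR : R.length = h := by rw [hR, List.length_drop]; omega
    have hlenP : P.length = h - 1 := by rw [hP, List.length_drop]; omega
    have t0 : triN 0 = 0 := rfl
    -- B side: rows = splitRows M2 0 ++ [P] ++ [R]
    have hs1 : splitRows L 0 = splitRows M 0 ++ [R] := by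
      have hc := splitRows_concat (h - 1) 0 M R
        (by rw [t0, show 0 + (h - 1) = h - 1 by omega]; omega)
        (by omega)
      rwa [List.take_append_drop] at hc
    have hs2 : splitRows M 0 = splitRows M2 0 ++ [P] := by
      have hc := splitRows_concat (h - 2) 0 M2 P
        (by rw [t0, show 0 + (h - 2) = h - 2 by omega]
            rw [hM2, List.length_take]; omega)
        (by omega)
      rwa [List.take_append_drop] at hc
    have hrows : splitRows L 0 = (splitRows M2 0 ++ [P]) ++ [R] := by
      rw [hs1, hs2]
    have hBfold := foldl_set_consec
      (fun j => max (R.getD j 0) (R.getD (j + 1) 0)) 0 (h - 1) P (by omega)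
    have hB : reduce_path_alt L
        = M2 ++ (List.range (h - 1)).map
            (fun j => P.getD j 0 + max (R.getD j 0) (R.getD (j + 1) 0)) := by
      simp only [reduce_path_alt, hrows, List.getLast?_concat, List.dropLast_concat]
      rw [hlenP]
      simp only [Nat.zero_add] at hBfold
      rw [hBfold, List.take_zero, List.nil_append,
        List.drop_eq_nil_of_le (show P.length ≤ h - 1 by omega), List.append_nil]
      rw [List.flatten_append, flatten_splitRows]
      simp
    -- A side
    have ha2 : triangular ((h : Int) - 2) = (t2 : Int) := by
      rw [show ((h : Int) - 2) = ((h - 2 : Nat) : Int) by omega, triangular_natCast]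
    have ha1 : triangular ((h : Int) - 1) = (t1 : Int) := by
      rw [show ((h : Int) - 1) = ((h - 1 : Nat) : Int) by omega, triangular_natCast]
    have hsl : PySem.List.slice L none (some ((L.length : Int) - (h : Int))) = M := by
      rw [show ((L.length : Int) - (h : Int)) = ((t1 : Nat) : Int) by omega,
        PySem.List.slice_to_natCast]
    have hAfold := foldl_set_consec
      (fun j => max (L.getD (t1 + j) 0) (L.getD (t1 + j + 1) 0)) t2 (h - 1) M (by omega)
    have hA : reduce_path L
        = M2 ++ (List.range (h - 1)).map
            (fun j => M.getD (t2 + j) 0 + max (L.getD (t1 + j) 0) (L.getD (t1 + j + 1) 0)) := by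
      simp only [reduce_path]
      rw [hth, hsl, ha2, ha1, PySem.List.pyRange_one,
        show (((h : Int) - 1) - 0).toNat = h - 1 by omega, List.foldl_map]
      simp only [zero_add]
      have hFG : (fun (x : List Int) (y : Nat) =>
          PySem.List.pySetD x ((t2 : Int) + (y : Int))
            (PySem.List.pyGetD x ((t2 : Int) + (y : Int)) 0 +
              max (PySem.List.pyGetD L ((t1 : Int) + (y : Int)) 0)
                (PySem.List.pyGetD L ((t1 : Int) + (y : Int) + 1) 0)))
          = (fun (acc : List Int) (j : Nat) =>
              acc.set (t2 + j) (acc.getD (t2 + j) 0 +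
                max (L.getD (t1 + j) 0) (L.getD (t1 + j + 1) 0))) := by
        funext x y
        rw [show (t2 : Int) + (y : Int) = ((t2 + y : Nat) : Int) by push_cast; ring,
          show (t1 : Int) + (y : Int) = ((t1 + y : Nat) : Int) by push_cast; ring,
          show ((t1 + y : Nat) : Int) + 1 = ((t1 + y + 1 : Nat) : Int) by push_cast; ring,
          PySem.List.pySetD_natCast, PySem.List.pyGetD_natCast,
          PySem.List.pyGetD_natCast, PySem.List.pyGetD_natCast]
      rw [hFG, hAfold, show t2 + (h - 1) = t1 by omega, ← hlenM,
        List.drop_length, List.append_nil, ← hM2]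
    rw [hA, hB]
    congr 1
    apply List.map_congr_left
    intro j _
    have hPj : P.getD j 0 = M.getD (t2 + j) 0 := by
      rw [hP]
      simp [List.getD_eq_getElem?_getD, List.getElem?_drop]
    have hRj : ∀ m : Nat, R.getD m 0 = L.getD (t1 + m) 0 := by
      intro m
      rw [hR]
      simp [List.getD_eq_getElem?_getD, List.getElem?_drop]
    simp only [hPj, hRj]
    rw [show t1 + (j + 1) = t1 + j + 1 by omega]

-- ===== VERDICT (by name: the statement is the Claim_ definition above) =====
theorem reduce_path_spec : Claim_equal_reduce_path := by
  intro L _ hpre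
  obtain ⟨h, _, hh⟩ := hpre
  have hlen : L.length = triN h := by have := two_triN h; omega
  exact reduce_path_eq L h hlen
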